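-- pv_equiv track=rewrite | github.com/RediYo/FRLCD | FRLCD/fedavg_rl.py | max_segment_index
-- ===== SOURCE A (Python) =====
-- def max_segment_index(up, x):
--     lst = [0]
--     i = 1
--     while (i <= up):
--         lst.append(i)
--         i = i * 2
--     lst[-1] = up
--     i = 1
--     while (i < len(lst)):
--         if (x <= lst[i]):  # 左开右闭区间
--             return i
--         i += 1
--     return i  # 索引值从1开始
-- ===== SOURCE B (Python) =====
-- def max_segment_index(up, x):
--     # Closed form: no list is built. The doubling partition is
--     # [0,1,2,4,...,2^(k-1),up] with k = floor(log2(up)); the segment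
--     # index is read off from bit lengths.
--     if up < 1:
--         return 1
--     k = up.bit_length() - 1      # 2**k <= up < 2**(k+1)
--     if x <= 1:
--         return 1
--     j = (x - 1).bit_length()     # smallest j with 2**j >= x
--     if j + 1 <= k:
--         return j + 1
--     return k + 1 if x <= up else k + 2
-- ===== Notes on version B (the rewrite author's own statement) =====
-- stated objective: alternative
-- what changed: B builds no list at all: it replaces A's list construction loop and linear scan by a closed form on bit lengths (k = up.bit_length()-1, j = (x-1).bit_length()) that reads the segment index off directly.
import Mathlib
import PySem

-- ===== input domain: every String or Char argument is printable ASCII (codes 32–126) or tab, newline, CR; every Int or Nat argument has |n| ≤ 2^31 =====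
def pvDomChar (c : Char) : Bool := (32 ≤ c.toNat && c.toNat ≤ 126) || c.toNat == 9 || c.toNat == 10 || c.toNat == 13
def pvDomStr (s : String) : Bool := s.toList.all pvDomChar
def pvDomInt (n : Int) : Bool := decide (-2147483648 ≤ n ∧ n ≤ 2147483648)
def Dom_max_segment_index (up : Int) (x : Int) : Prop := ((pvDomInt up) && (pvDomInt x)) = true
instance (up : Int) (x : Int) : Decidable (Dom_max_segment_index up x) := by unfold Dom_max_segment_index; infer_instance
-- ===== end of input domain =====

-- B replaces A's list construction and linear scan by a closed form on bit lengths (objective: alternative).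

-- ===== PORT A =====
-- first while loop of A: while i <= up: lst.append(i); i = i * 2
-- (0 < i is the loop invariant from i = 1, needed only for termination)
def loopA (up : Int) (i : Int) (lst : List Int) (hi : 0 < i) : List Int :=
  if h : i ≤ up then loopA up (i * 2) (lst ++ [i]) (by omega) else lst
termination_by (up + 1 - i).toNat
decreasing_by omega

-- second while loop of A: while i < len(lst): if x <= lst[i]: return i; i += 1; return i
def scanA (lst : List Int) (x : Int) (i : Nat) : Int :=
  if h : i < lst.length then
    if x ≤ lst[i] then (i : Int) else scanA lst x (i + 1)
  else (i : Int)
termination_by lst.length - i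

-- lst[-1] = up : the list always starts with the appended 0, so it is nonempty and
-- Python's index -1 is exactly its last position (dropLast ++ [up])
def max_segment_index (up : Int) (x : Int) : Int :=
  scanA ((loopA up 1 [0] (by norm_num)).dropLast ++ [up]) x 1

-- ===== PORT B =====
-- Nat.size is Python's int.bit_length() on nonnegative ints
def max_segment_index_alt (up : Int) (x : Int) : Int :=
  if up < 1 then 1
  else if x ≤ 1 then 1
  -- j := (x - 1).bit_length(), k := up.bit_length() - 1, inlined
  else if (x - 1).toNat.size + 1 ≤ up.toNat.size - 1 then ((x - 1).toNat.size : Int) + 1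
  else if x ≤ up then ((up.toNat.size - 1 : Nat) : Int) + 1
  else ((up.toNat.size - 1 : Nat) : Int) + 2

-- ===== PRECONDITION & SPEC =====
def Spec_max_segment_index (up : Int) (x : Int) (out : Int) : Prop := out = max_segment_index_alt up x
instance (up : Int) (x : Int) (out : Int) : Decidable (Spec_max_segment_index up x out) := by unfold Spec_max_segment_index; infer_instance

-- ===== CLAIM (what is proved, stated in full; the proofs are below) =====
def Claim_equal_max_segment_index : Prop := ∀ (up : Int) (x : Int), Dom_max_segment_index up x → Spec_max_segment_index up x (max_segment_index up x)

-- ===== LEMMAS AND PROOFS =====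

theorem loopA_gt (up i : Int) (lst : List Int) (hi : 0 < i) (h : up < i) :
    loopA up i lst hi = lst := by
  rw [loopA.eq_def]
  simp [not_le.mpr h]

theorem loopA_pows (up : Int) (k : Nat) (h1 : (2:Int)^k ≤ up) (h2 : up < 2^(k+1)) :
    ∀ (d t : Nat) (lst : List Int) (hi : (0:Int) < 2^t), t + d = k →
      loopA up ((2:Int)^t) lst hi =
        lst ++ (List.range' t (k + 1 - t)).map (fun s => (2:Int)^s) := by
  intro d
  induction d with
  | zero =>
    intro t lst hi ht
    have htk : t = k := by omega
    subst htk
    rw [loopA.eq_def]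
    have h2' : up < (2:Int)^t * 2 := by
      have : (2:Int)^(t+1) = 2^t * 2 := by ring
      omega
    rw [dif_pos h1, loopA_gt _ _ _ _ h2']
    have : t + 1 - t = 1 := by omega
    simp [this, List.range'_one]
  | succ d ih =>
    intro t lst hi ht
    have hle : (2:Int)^t ≤ up := by
      have : (2:Int)^t ≤ 2^k := by
        apply pow_le_pow_right₀ (by norm_num) (by omega)
      omega
    rw [loopA.eq_def, dif_pos hle]
    have hstep := ih (t+1) (lst ++ [(2:Int)^t]) (by positivity) (by omega)
    simp only [show (2:Int)^t * 2 = 2^(t+1) by ring]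
    rw [hstep]
    have hr : List.range' t (k + 1 - t) = t :: List.range' (t+1) (k + 1 - (t+1)) := by
      have hn : k + 1 - t = (k + 1 - (t+1)) + 1 := by omega
      rw [hn, List.range'_succ]
    rw [hr]
    simp

theorem scanA_eq (L : List Int) (x : Int) (n : Nat) (hn : n ≤ L.length)
    (hstop : n = L.length ∨ ∃ h : n < L.length, x ≤ L[n]) :
    ∀ (d i : Nat), i + d = n →
      (∀ m (hm : m < L.length), i ≤ m → m < n → L[m] < x) →
      scanA L x i = (n : Int) := by
  intro d
  induction d with
  | zero =>
    intro i hi _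
    have : i = n := by omega
    subst this
    rw [scanA.eq_def]
    rcases hstop with h | ⟨h, hx⟩
    · rw [dif_neg (by omega)]
    · rw [dif_pos h, if_pos hx]
  | succ d ih =>
    intro i hi hlt
    have hilen : i < L.length := by omega
    rw [scanA.eq_def, dif_pos hilen,
      if_neg (not_le.mpr (hlt i hilen (le_refl i) (by omega)))]
    exact ih (i+1) (by omega) (fun m hm h1 h2 => hlt m hm (by omega) h2)

-- element m of the final list 0 :: powers ++ [up]
theorem L_get (k : Nat) (up : Int) (m : Nat)
    (hm : m < (0 :: ((List.range k).map (fun s => (2:Int)^s) ++ [up])).length) :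
    (0 :: ((List.range k).map (fun s => (2:Int)^s) ++ [up]))[m] =
      if m = 0 then 0 else if m ≤ k then 2^(m-1) else up := by
  match m with
  | 0 => simp
  | Nat.succ m =>
    simp only [List.getElem_cons_succ]
    simp at hm
    rcases Nat.lt_or_ge m k with h | h
    · rw [List.getElem_append_left (by simpa using h)]
      simp [Nat.lt_iff_add_one_le.mp h]
    · have hmk : m = k := by omega
      subst hmk
      rw [List.getElem_append_right (by simp)]
      simp

theorem L_len (k : Nat) (up : Int) :
    (0 :: ((List.range k).map (fun s => (2:Int)^s) ++ [up])).length = k + 2 := by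
  simp

-- the built list, for up ≥ 1 with 2^k ≤ up < 2^(k+1)
theorem build_eq (up : Int) (k : Nat) (h1 : (2:Int)^k ≤ up) (h2 : up < 2^(k+1)) :
    (loopA up 1 [0] (by norm_num)).dropLast ++ [up] =
      0 :: ((List.range k).map (fun s => (2:Int)^s) ++ [up]) := by
  have h0 : (0:Int) < 2^0 := by norm_num
  have := loopA_pows up k h1 h2 k 0 [0] h0 (by omega)
  have he : loopA up 1 [0] (by norm_num) = loopA up ((2:Int)^0) [0] h0 := by norm_num
  rw [he, this]
  have hr : List.range' 0 (k + 1 - 0) = List.range (k+1) := by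
    rw [show k + 1 - 0 = k + 1 from rfl, List.range_eq_range']
  rw [hr, List.range_succ, List.map_append]
  rw [show ([(0:Int)] ++ (List.map (fun s => (2:Int)^s) (List.range k) ++ List.map (fun s => (2:Int)^s) [k]))
        = ((0 :: List.map (fun s => (2:Int)^s) (List.range k)) ++ [(2:Int)^k]) by simp]
  rw [List.dropLast_concat]
  simp

-- bit-length facts for B
theorem size_bounds (n : Int) (hn : 1 ≤ n) :
    (2:Int)^(n.toNat.size - 1) ≤ n ∧ n < 2^(n.toNat.size - 1 + 1) := by
  have hpos : 0 < n.toNat := by omega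
  have hs : 0 < n.toNat.size := Nat.size_pos.mpr hpos
  have hlo : 2^(n.toNat.size - 1) ≤ n.toNat := Nat.lt_size.mp (by omega)
  have hhi : n.toNat < 2^(n.toNat.size) := Nat.lt_size_self _
  have hcast : ((n.toNat : Int)) = n := Int.toNat_of_nonneg (by omega)
  constructor
  · calc (2:Int)^(n.toNat.size - 1) = ((2^(n.toNat.size - 1) : Nat) : Int) := by push_cast; ring
      _ ≤ (n.toNat : Int) := by exact_mod_cast hlo
      _ = n := hcast
  · have : n.toNat.size - 1 + 1 = n.toNat.size := by omega
    rw [this]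
    calc n = (n.toNat : Int) := hcast.symm
      _ < ((2^(n.toNat.size) : Nat) : Int) := by exact_mod_cast hhi
      _ = (2:Int)^(n.toNat.size) := by push_cast; ring

-- ===== VERDICT (by name: the statement is the Claim_ definition above) =====
theorem max_segment_index_spec : Claim_equal_max_segment_index := by
  intro up x _
  unfold Spec_max_segment_index max_segment_index max_segment_index_alt
  by_cases hup : up < 1
  · -- lst = [0], then lst[-1] = up gives [up]; the scan returns 1 immediately
    rw [if_pos hup, loopA_gt up 1 [0] (by norm_num) (by omega)]
    rw [show (([(0:Int)]).dropLast ++ [up]) = [up] from rfl]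
    rw [scanA.eq_def]
    norm_num
  · push Not at hup
    rw [if_neg (not_lt.mpr hup)]
    obtain ⟨h1, h2⟩ := size_bounds up hup
    set k : Nat := up.toNat.size - 1 with hk
    rw [build_eq up k h1 h2]
    have hlen := L_len k up
    by_cases hx1 : x ≤ 1
    · -- first probe already succeeds: x ≤ L[1]
      rw [if_pos hx1]
      apply scanA_eq _ x 1 (by omega)
        (Or.inr ⟨by omega, ?_⟩) 0 1 (by omega) (by omega)
      rw [L_get k up 1 (by omega)]
      rcases Nat.eq_zero_or_pos k with h | h
      · simp [h]; omega
      · simp; omega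
    · push Not at hx1
      rw [if_neg (not_le.mpr hx1)]
      set j : Nat := (x - 1).toNat.size with hj
      obtain ⟨hj1, hj2⟩ := size_bounds (x - 1) (by omega)
      rw [← hj] at hj1 hj2
      have hjpos : 0 < j := by
        rw [hj]; exact Nat.size_pos.mpr (by omega)
      have hjlo : (2:Int)^(j-1) < x := by omega
      have hjhi : x ≤ (2:Int)^j := by
        have : j - 1 + 1 = j := by omega
        rw [← this]; omega
      -- all entries strictly below the answer are < x
      have hsmall : ∀ m, 1 ≤ m → m ≤ j → (2:Int)^(m-1) < x := by
        intro m hm1 hmj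
        have : (2:Int)^(m-1) ≤ 2^(j-1) :=
          pow_le_pow_right₀ (by norm_num) (by omega)
        omega
      by_cases hjk : j + 1 ≤ k
      · rw [if_pos hjk]
        apply scanA_eq _ x (j+1) (by omega)
          (Or.inr ⟨by omega, ?_⟩) j 1 (by omega) ?_
        · rw [L_get k up (j+1) (by omega)]
          simp only [Nat.succ_ne_zero, if_false, if_pos hjk]
          simpa using hjhi
        · intro m hm h1m h2m
          rw [L_get k up m (by omega)]
          simp only [if_neg (by omega : ¬ m = 0), if_pos (by omega : m ≤ k)]
          exact hsmall m h1m (by omega)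
      · rw [if_neg hjk]
        push Not at hjk
        by_cases hxu : x ≤ up
        · rw [if_pos hxu]
          apply scanA_eq _ x (k+1) (by omega)
            (Or.inr ⟨by omega, ?_⟩) k 1 (by omega) ?_
          · rw [L_get k up (k+1) (by omega)]
            simp only [Nat.succ_ne_zero, if_false, if_neg (by omega : ¬ k + 1 ≤ k)]
            exact hxu
          · intro m hm h1m h2m
            rw [L_get k up m (by omega)]
            simp only [if_neg (by omega : ¬ m = 0), if_pos (by omega : m ≤ k)]
            exact hsmall m h1m (by omega)
        · rw [if_neg hxu]
          push Not at hxu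
          rw [show ((k:Int) + 2) = ((k + 2 : Nat) : Int) by push_cast; ring]
          apply scanA_eq _ x (k+2) (by omega) (Or.inl hlen.symm) (k+1) 1 (by omega) ?_
          intro m hm h1m h2m
          rw [L_get k up m (by omega)]
          by_cases hmk : m ≤ k
          · simp only [if_neg (by omega : ¬ m = 0), if_pos hmk]
            exact hsmall m h1m (by omega)
          · simp only [if_neg (by omega : ¬ m = 0), if_neg hmk]
            exact hxu
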